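-- pv_equiv track=rewrite | github.com/Oliveeez/GuessBenchmark | query_language/utils/utils.py | filter_constraints_error
-- ===== SOURCE A (Python) =====
-- def filter_constraints_error(s):
--     lines = s.split('\n')
--     filtered_lines = []
--     for i, line in enumerate(lines):
--         if line.startswith('Constraints Error'):
--             for j in range(i, len(lines)):
--                 filtered_lines.append(lines[j])
--             return '\n'.join(filtered_lines)
--     return ''  # Return an empty string if no Constraints Error is found
-- ===== SOURCE B (Python) =====
-- def filter_constraints_error(s):
--     if s.startswith('Constraints Error'):
--         return s
--     pos = s.find('\nConstraints Error')
--     return s[pos + 1:] if pos != -1 else ''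
-- ===== Notes on version B (the rewrite author's own statement) =====
-- stated objective: simpler
-- what changed: Instead of splitting into a line list, scanning it with enumerate and re-joining the tail, B does one substring search for the newline-prefixed marker (plus a position-0 startswith check) and returns a single slice of the raw string.
import Mathlib
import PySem

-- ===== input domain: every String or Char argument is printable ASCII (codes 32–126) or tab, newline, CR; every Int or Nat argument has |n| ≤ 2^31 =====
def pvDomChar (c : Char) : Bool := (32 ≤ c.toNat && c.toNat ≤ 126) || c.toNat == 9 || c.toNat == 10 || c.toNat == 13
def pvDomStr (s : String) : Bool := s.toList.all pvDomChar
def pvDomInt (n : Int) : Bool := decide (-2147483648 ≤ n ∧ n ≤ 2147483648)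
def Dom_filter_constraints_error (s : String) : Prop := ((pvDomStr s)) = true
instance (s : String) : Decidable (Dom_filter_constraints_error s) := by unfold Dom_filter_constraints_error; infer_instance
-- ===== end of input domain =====

-- B replaces A's split-into-lines / enumerate-scan / re-join with one substring search and a slice; objective: simpler.

-- ===== PORT A =====
-- the 'for i, line in enumerate(lines)' loop; on a hit the inner 'for j in range(i, len(lines))' append loop, then the join
def fceLoop (lines : List String) : List (Int × String) → String
  | [] => ""
  | (i, line) :: rest =>
    if PySem.Str.startswith line "Constraints Error" then
      let filtered := (PySem.List.pyRange i (PySem.List.len lines)).foldl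
        (fun acc j => acc ++ [PySem.List.pyGetD lines j ""]) ([] : List String)
      PySem.Str.join "\n" filtered
    else fceLoop lines rest

def filter_constraints_error (s : String) : String :=
  let lines := (PySem.Str.split? s "\n").getD []   -- sep ≠ "", so split? is always `some`
  fceLoop lines (PySem.List.enumerate lines)

-- ===== PORT B =====
def filter_constraints_error_alt (s : String) : String :=
  if PySem.Str.startswith s "Constraints Error" then s
  else
    let pos := PySem.Str.find s "\nConstraints Error"
    if pos ≠ -1 then PySem.Str.slice s (some (pos + 1)) none else ""

-- ===== PRECONDITION & SPEC =====
def Spec_filter_constraints_error (s : String) (out : String) : Prop := out = filter_constraints_error_alt s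
instance (s : String) (out : String) : Decidable (Spec_filter_constraints_error s out) := by unfold Spec_filter_constraints_error; infer_instance

-- ===== CLAIM (what is proved, stated in full; the proofs are below) =====
def Claim_equal_filter_constraints_error : Prop := ∀ (s : String), Dom_filter_constraints_error s → Spec_filter_constraints_error s (filter_constraints_error s)

-- ===== LEMMAS AND PROOFS =====

-- the marker, as chars
def pvM : List Char := "Constraints Error".toList

-- reference single-char split on '\n'
def pvSplit : List Char → List (List Char)
  | [] => [[]]
  | c :: cs => if c = '\n' then [] :: pvSplit cs else (pvSplit cs).modifyHead (c :: ·)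

lemma pvSplit_ne_nil (cs : List Char) : pvSplit cs ≠ [] := by
  induction cs with
  | nil => simp [pvSplit]
  | cons c cs ih =>
    simp only [pvSplit]
    split_ifs
    · simp
    · cases hs : pvSplit cs with
      | nil => exact absurd hs ih
      | cons h t => simp [List.modifyHead]

lemma pvSplit_cons_nl (cs : List Char) : pvSplit ('\n' :: cs) = [] :: pvSplit cs := by
  simp [pvSplit]

lemma pvSplit_cons_ne {c : Char} (cs : List Char) (hc : c ≠ '\n') :
    pvSplit (c :: cs) = (pvSplit cs).modifyHead (c :: ·) := by
  simp [pvSplit, hc]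

lemma pvSplit_go (fuel : Nat) (l cur : List Char) (acc : List (List Char))
    (h : l.length ≤ fuel) :
    PySem.Chars.splitOn.go ['\n'] fuel l cur acc
      = acc.reverse ++ (pvSplit l).modifyHead (cur.reverse ++ ·) := by
  induction fuel generalizing l cur acc with
  | zero =>
    have : l = [] := by cases l <;> simp_all
    subst this
    simp [PySem.Chars.splitOn.go, pvSplit, List.modifyHead]
  | succ fuel ih =>
    cases l with
    | nil => simp [PySem.Chars.splitOn.go, pvSplit, List.modifyHead]
    | cons c rest =>
      by_cases hc : c = '\n'
      · subst hc
        rw [show PySem.Chars.splitOn.go ['\n'] (fuel+1) ('\n'::rest) cur acc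
              = PySem.Chars.splitOn.go ['\n'] fuel rest [] (cur.reverse :: acc) from by
            simp [PySem.Chars.splitOn.go, List.isPrefixOf]]
        rw [ih rest [] (cur.reverse :: acc) (by simpa using Nat.lt_succ_iff.mp (by simpa using h))]
        rw [pvSplit_cons_nl]
        cases hs : pvSplit rest with
        | nil => exact absurd hs (pvSplit_ne_nil rest)
        | cons hd tl => simp [List.modifyHead]
      · rw [show PySem.Chars.splitOn.go ['\n'] (fuel+1) (c::rest) cur acc
              = PySem.Chars.splitOn.go ['\n'] fuel rest (c :: cur) acc from by
            simp only [PySem.Chars.splitOn.go, List.isPrefixOf]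
            split <;> rename_i hp
            · have : '\n' = c := by simpa using hp
              exact absurd this.symm hc
            · rfl]
        rw [ih rest (c :: cur) acc (by simpa using Nat.lt_succ_iff.mp (by simpa using h))]
        rw [pvSplit_cons_ne rest hc]
        cases hs : pvSplit rest with
        | nil => exact absurd hs (pvSplit_ne_nil rest)
        | cons hd tl => simp [List.modifyHead]

lemma splitOn_eq_pvSplit (cs : List Char) :
    PySem.Chars.splitOn cs ['\n'] = pvSplit cs := by
  rw [PySem.Chars.splitOn, pvSplit_go _ _ _ _ (by omega)]
  cases hs : pvSplit cs with
  | nil => exact absurd hs (pvSplit_ne_nil cs)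
  | cons hd tl => simp [List.modifyHead]

lemma join_pvSplit (cs : List Char) :
    PySem.Chars.join ['\n'] (pvSplit cs) = cs := by
  induction cs with
  | nil => simp [pvSplit, PySem.Chars.join_singleton]
  | cons c cs ih =>
    by_cases hc : c = '\n'
    · subst hc
      rw [pvSplit_cons_nl]
      cases hs : pvSplit cs with
      | nil => exact absurd hs (pvSplit_ne_nil cs)
      | cons hd tl =>
        rw [PySem.Chars.join_cons_cons]
        rw [hs] at ih; rw [ih]
        simp
    · rw [pvSplit_cons_ne cs hc]
      cases hs : pvSplit cs with
      | nil => exact absurd hs (pvSplit_ne_nil cs)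
      | cons hd tl =>
        rw [hs] at ih
        cases tl with
        | nil =>
          simp [List.modifyHead, PySem.Chars.join_singleton] at ih ⊢
          rw [ih]
        | cons q t =>
          simp only [List.modifyHead]
          rw [PySem.Chars.join_cons_cons] at ih ⊢
          rw [List.cons_append, List.cons_append, ih]

lemma pvSplit_no_nl (t : List Char) (h : '\n' ∉ t) : pvSplit t = [t] := by
  induction t with
  | nil => rfl
  | cons c t ih =>
    have hc : c ≠ '\n' := fun hc => h (hc ▸ List.mem_cons_self)
    rw [pvSplit_cons_ne t hc, ih (fun hm => h (List.mem_cons_of_mem _ hm))]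
    rfl

lemma pvSplit_append (t rest : List Char) (h : '\n' ∉ t) :
    pvSplit (t ++ '\n' :: rest) = t :: pvSplit rest := by
  induction t with
  | nil => simpa using pvSplit_cons_nl rest
  | cons c t ih =>
    have hc : c ≠ '\n' := fun hc => h (hc ▸ List.mem_cons_self)
    rw [List.cons_append, pvSplit_cons_ne _ hc, ih (fun hm => h (List.mem_cons_of_mem _ hm))]
    rfl

lemma nl_not_mem_pvM : '\n' ∉ pvM := by decide

-- marker at the head of a line: pvM <+: t ++ '\n'::rest ↔ pvM <+: t (t newline-free)
lemma prefix_line_iff (t rest : List Char) :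
    pvM <+: (t ++ '\n' :: rest) ↔ pvM <+: t := by
  constructor
  · intro hp
    by_cases hlen : pvM.length ≤ t.length
    · have heq : pvM = List.take pvM.length (t ++ '\n' :: rest) :=
        List.prefix_iff_eq_take.mp hp
      rw [List.take_append_of_le_length hlen] at heq
      rw [heq]
      exact List.take_prefix _ t
    · exfalso
      obtain ⟨u, hu⟩ := hp
      have hlt : t.length < pvM.length := by omega
      have hi : t.length < (pvM ++ u).length := by simp; omega
      have hnl : (pvM ++ u)[t.length]'hi = '\n' := by
        rw [List.getElem_of_eq hu hi]; simp
      rw [List.getElem_append_left hlt] at hnl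
      exact nl_not_mem_pvM (hnl ▸ List.getElem_mem hlt)
  · intro hp
    exact hp.trans (List.prefix_append t ('\n' :: rest))

-- find characterised by first occurrence
lemma find_eq_of (cs pat : List Char) (v : Nat)
    (h1 : pat <+: cs.drop v) (h2 : ∀ i, i < v → ¬ pat <+: cs.drop i) :
    PySem.Chars.find cs pat = v := by
  have hinf : pat <:+: cs := h1.isInfix.trans (List.drop_suffix v cs).isInfix
  have hne : PySem.Chars.find cs pat ≠ -1 := (PySem.Chars.find_ne_neg_one_iff cs pat).mpr hinf
  have hnn : 0 ≤ PySem.Chars.find cs pat := by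
    have := PySem.Chars.neg_one_le_find cs pat
    omega
  obtain ⟨hpre, hmin⟩ := PySem.Chars.find_spec hnn
  have : (PySem.Chars.find cs pat).toNat = v := by
    rcases Nat.lt_trichotomy (PySem.Chars.find cs pat).toNat v with h | h | h
    · exact absurd hpre (h2 _ h)
    · exact h
    · exact absurd h1 (hmin v h)
  omega

lemma find_eq_neg_of (cs pat : List Char)
    (h : ∀ i, ¬ pat <+: cs.drop i) :
    PySem.Chars.find cs pat = -1 := by
  rw [PySem.Chars.find_eq_neg_one_iff]
  intro hinf
  have : PySem.Chars.isIn pat cs = true := (PySem.Chars.isIn_iff_infix pat cs).mpr hinf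
  obtain ⟨j, hj⟩ := (PySem.Chars.exists_prefix_drop_iff_isIn pat cs).mpr this
  exact h j hj

-- no occurrence of the newline-prefixed marker starts inside the newline-free first line
lemma no_hit_in_line (t rest : List Char) (h : '\n' ∉ t) (i : Nat) (hi : i < t.length) :
    ¬ ('\n' :: pvM) <+: (t ++ '\n' :: rest).drop i := by
  intro hp
  have hd : (t ++ '\n' :: rest).drop i = t.drop i ++ '\n' :: rest := by
    rw [List.drop_append_of_le_length (le_of_lt hi)]
  rw [hd] at hp
  obtain ⟨u, hu⟩ := hp
  have hhead : (t.drop i ++ '\n' :: rest).head? = some '\n' := by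
    rw [← hu]; rfl
  have hne : t.drop i ≠ [] := by
    intro hnil
    have := congrArg List.length hnil
    simp at this; omega
  rw [List.head?_append_of_ne_nil _ hne] at hhead
  have : t[i]? = some '\n' := by rwa [← List.head?_drop]
  have : '\n' ∈ t := by
    have hg : t[i] = '\n' := by
      have := List.getElem?_eq_getElem hi
      rw [this] at *; simp_all
    exact hg ▸ List.getElem_mem hi
  exact h this

-- the two find-shift facts over the first line
lemma find_hit (t rest : List Char) (h : '\n' ∉ t) (hm : pvM <+: rest) :
    PySem.Chars.find (t ++ '\n' :: rest) ('\n' :: pvM) = t.length := by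
  apply find_eq_of
  · rw [List.drop_left]
    exact List.cons_prefix_cons.mpr ⟨rfl, hm⟩
  · exact fun i hi => no_hit_in_line t rest h i hi

lemma drop_past_line (t rest : List Char) (k : Nat) :
    (t ++ '\n' :: rest).drop (t.length + 1 + k) = rest.drop k := by
  have : t.length + 1 + k = t.length + (1 + k) := by omega
  rw [this, List.drop_append]
  simp [List.drop_succ_cons, Nat.add_comm 1 k]

lemma find_miss (t rest : List Char) (h : '\n' ∉ t) (hm : ¬ pvM <+: rest) :
    PySem.Chars.find (t ++ '\n' :: rest) ('\n' :: pvM)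
      = if PySem.Chars.find rest ('\n' :: pvM) = -1 then -1
        else t.length + 1 + PySem.Chars.find rest ('\n' :: pvM) := by
  by_cases hf : PySem.Chars.find rest ('\n' :: pvM) = -1
  · rw [if_pos hf]
    apply find_eq_neg_of
    intro i hp
    rcases Nat.lt_trichotomy i t.length with hi | hi | hi
    · exact no_hit_in_line t rest h i hi hp
    · subst hi
      rw [List.drop_left] at hp
      exact hm (List.cons_prefix_cons.mp hp).2
    · have hk : i = t.length + 1 + (i - t.length - 1) := by omega
      rw [hk, drop_past_line] at hp
      have : ('\n' :: pvM) <:+: rest :=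
        hp.isInfix.trans (List.drop_suffix _ rest).isInfix
      exact (PySem.Chars.find_ne_neg_one_iff rest _).mpr this hf
  · rw [if_neg hf]
    have hnn : 0 ≤ PySem.Chars.find rest ('\n' :: pvM) := by
      have := PySem.Chars.neg_one_le_find rest ('\n' :: pvM)
      omega
    obtain ⟨hpre, hmin⟩ := PySem.Chars.find_spec hnn
    set q := (PySem.Chars.find rest ('\n' :: pvM)).toNat with hq
    have : PySem.Chars.find (t ++ '\n' :: rest) ('\n' :: pvM) = (t.length + 1 + q : Nat) := by
      apply find_eq_of
      · rw [drop_past_line]; exact hpre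
      · intro i hi hp
        rcases Nat.lt_trichotomy i t.length with h2 | h2 | h2
        · exact no_hit_in_line t rest h i h2 hp
        · subst h2
          rw [List.drop_left] at hp
          obtain ⟨u, hu⟩ := hp
          exact hm ⟨u, by injection hu⟩
        · have hk : i = t.length + 1 + (i - t.length - 1) := by omega
          rw [hk, drop_past_line] at hp
          exact hmin (i - t.length - 1) (by omega) hp
    rw [this]; push_cast; omega

-- B's result, at the char level
def pvB (cs : List Char) : List Char :=
  if pvM <+: cs then cs
  else if PySem.Chars.find cs ('\n' :: pvM) = -1 then []
  else PySem.List.slice cs (some (PySem.Chars.find cs ('\n' :: pvM) + 1)) none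

-- A's scan, at the string-list level (what fceLoop over enumerate computes)
def pvA : List String → String
  | [] => ""
  | l :: rest =>
    if PySem.Str.startswith l "Constraints Error" then PySem.Str.join "\n" (l :: rest)
    else pvA rest

lemma foldl_append_singleton {α : Type} (l : List α) (init : List α) :
    List.foldl (fun acc x => acc ++ [x]) init l = init ++ l := by
  induction l generalizing init with
  | nil => simp
  | cons x t ih => simp [List.foldl, ih]

lemma fceLoop_eq_pvA (L : List String) (k : Nat) (d : List String)
    (hd : L.drop k = d) :
    fceLoop L (PySem.List.enumerate d (k : Int)) = pvA d := by
  induction d generalizing k with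
  | nil => simp [PySem.List.enumerate, fceLoop, pvA]
  | cons l rest ih =>
    rw [show PySem.List.enumerate (l :: rest) (k : Int)
          = ((k : Int), l) :: PySem.List.enumerate rest ((k : Int) + 1) from by
        simp [PySem.List.enumerate]]
    simp only [fceLoop, pvA]
    by_cases hs : PySem.Str.startswith l "Constraints Error" = true
    · rw [if_pos hs, if_pos hs]
      rw [PySem.List.foldl_pyRange_pyGetD L "" (fun acc x => acc ++ [x]) [] (by positivity)]
      rw [Int.toNat_natCast, hd, foldl_append_singleton]
      simp
    · rw [if_neg hs, if_neg hs]
      have hd' : L.drop (k + 1) = rest := by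
        rw [← List.drop_drop, hd]; rfl
      have := ih (k + 1) hd'
      rw [show ((k : Int) + 1) = ((k + 1 : Nat) : Int) from by push_cast; ring]
      exact this

-- A's scan, at the char level
def pvAC : List (List Char) → List Char
  | [] => []
  | l :: rest =>
    if pvM <+: l then PySem.Chars.join ['\n'] (l :: rest) else pvAC rest

lemma pvA_toList (L : List String) : (pvA L).toList = pvAC (L.map String.toList) := by
  induction L with
  | nil => simp [pvA, pvAC]
  | cons l rest ih =>
    simp only [pvA, pvAC, List.map]
    by_cases hp : pvM <+: l.toList
    · have hs : PySem.Str.startswith l "Constraints Error" = true := by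
        rw [PySem.Str.startswith_eq]
        exact (PySem.Chars.startswith_iff _ _).mpr hp
      rw [if_pos hs, if_pos hp, PySem.Str.toList_join]
      rfl
    · have hs : ¬ PySem.Str.startswith l "Constraints Error" = true := by
        rw [PySem.Str.startswith_eq]
        exact fun h => hp ((PySem.Chars.startswith_iff _ _).mp h)
      rw [if_neg hs, if_neg hp, ih]

lemma pvB_of_prefix (cs : List Char) (h : pvM <+: cs) : pvB cs = cs := by
  rw [pvB, if_pos h]

lemma pvAC_pvSplit (n : Nat) : ∀ cs : List Char, cs.length ≤ n →
    pvAC (pvSplit cs) = pvB cs := by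
  induction n with
  | zero =>
    intro cs hn
    have : cs = [] := by cases cs <;> simp_all
    subst this
    decide
  | succ n ih =>
    intro cs hn
    rcases hdw : cs.dropWhile (fun c => c != '\n') with _ | ⟨c0, rest⟩
    · -- no newline in cs at all
      have hcs : cs.takeWhile (fun c => c != '\n') = cs := by
        have := List.takeWhile_append_dropWhile (p := fun c => c != '\n') (l := cs)
        rw [hdw] at this; simpa using this
      have hnl : '\n' ∉ cs := by
        intro hm
        rw [← hcs] at hm
        have := List.mem_takeWhile_imp hm
        simp at this
      rw [pvSplit_no_nl cs hnl]
      by_cases hp : pvM <+: cs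
      · rw [pvB_of_prefix cs hp]
        simp [pvAC, if_pos hp, PySem.Chars.join_singleton]
      · rw [pvB, if_neg hp]
        simp only [pvAC, if_neg hp]
        have hf : PySem.Chars.find cs ('\n' :: pvM) = -1 := by
          apply find_eq_neg_of
          intro i hpre
          obtain ⟨u, hu⟩ := hpre
          have : '\n' ∈ cs := by
            have : '\n' ∈ cs.drop i := by rw [← hu]; simp
            exact List.mem_of_mem_drop this
          exact hnl this
        simp [hf]
    · -- cs = t ++ '\n' :: rest with t newline-free
      have hc0 : c0 = '\n' := by
        have hne : cs.dropWhile (fun c => c != '\n') ≠ [] := by rw [hdw]; simp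
        have h1 := List.head_dropWhile_not (fun c => c != '\n') hne
        have h2 : (cs.dropWhile (fun c => c != '\n')).head hne = c0 := by
          simp only [hdw, List.head_cons]
        rw [h2] at h1
        simpa using h1
      subst hc0
      set t := cs.takeWhile (fun c => c != '\n') with ht
      have hcs : cs = t ++ '\n' :: rest := by
        conv_lhs => rw [← List.takeWhile_append_dropWhile (p := fun c => c != '\n') (l := cs)]
        rw [hdw]
      have hnt : '\n' ∉ t := by
        intro hm
        have := List.mem_takeWhile_imp hm
        simp at this
      have hlen : rest.length ≤ n := by
        have := congrArg List.length hcs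
        simp at this
        omega
      have hsplit : pvSplit cs = t :: pvSplit rest := by
        rw [hcs]; exact pvSplit_append t rest hnt
      rw [hsplit]
      by_cases hp : pvM <+: cs
      · have hpt : pvM <+: t := (prefix_line_iff t rest).mp (hcs ▸ hp)
        simp only [pvAC, if_pos hpt]
        rw [← hsplit, join_pvSplit, pvB_of_prefix cs hp]
      · have hpt : ¬ pvM <+: t := fun h2 => hp (hcs ▸ (prefix_line_iff t rest).mpr h2)
        simp only [pvAC, if_neg hpt]
        rw [ih rest hlen]
        by_cases hr : pvM <+: rest
        · have hf : PySem.Chars.find cs ('\n' :: pvM) = (t.length : Int) := by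
            conv_lhs => rw [hcs]
            exact find_hit t rest hnt hr
          simp only [pvB, if_pos hr, if_neg hp, hf]
          rw [if_neg (by omega : ¬ (t.length : Int) = -1)]
          rw [PySem.List.slice_from cs (by positivity : (0:Int) ≤ (t.length : Int) + 1)]
          rw [show ((t.length : Int) + 1).toNat = t.length + 1 + 0 from by omega]
          rw [hcs, drop_past_line]
          simp
        · have hfm : PySem.Chars.find cs ('\n' :: pvM)
              = if PySem.Chars.find rest ('\n' :: pvM) = -1 then -1
                else t.length + 1 + PySem.Chars.find rest ('\n' :: pvM) := by
            conv_lhs => rw [hcs]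
            exact find_miss t rest hnt hr
          by_cases hfr : PySem.Chars.find rest ('\n' :: pvM) = -1
          · simp [pvB, hfm, hfr, if_neg hp, if_neg hr]
          · have hq : 0 ≤ PySem.Chars.find rest ('\n' :: pvM) := by
              have := PySem.Chars.neg_one_le_find rest ('\n' :: pvM)
              omega
            set q := (PySem.Chars.find rest ('\n' :: pvM)).toNat with hqd
            have hqe : PySem.Chars.find rest ('\n' :: pvM) = (q : Int) := by omega
            simp only [pvB, if_neg hp, if_neg hr, hfm, hqe]
            simp only [if_neg (show ¬ ((q : Int)) = -1 from by omega)]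
            rw [if_neg (by omega : ¬ ((t.length : Int) + 1 + (q : Int)) = -1)]
            rw [PySem.List.slice_from rest (by positivity)]
            rw [PySem.List.slice_from cs (by positivity)]
            rw [show ((t.length : Int) + 1 + (q : Int) + 1).toNat = t.length + 1 + (q + 1) from by omega]
            rw [show ((q : Int) + 1).toNat = q + 1 from by omega]
            rw [hcs, drop_past_line]

lemma alt_toList (s : String) :
    (filter_constraints_error_alt s).toList = pvB s.toList := by
  simp only [filter_constraints_error_alt, pvB]
  by_cases hp : pvM <+: s.toList
  · have hs : PySem.Str.startswith s "Constraints Error" = true := by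
      rw [PySem.Str.startswith_eq]
      exact (PySem.Chars.startswith_iff _ _).mpr hp
    rw [if_pos hs, if_pos hp]
  · have hs : ¬ PySem.Str.startswith s "Constraints Error" = true := by
      rw [PySem.Str.startswith_eq]
      exact fun h => hp ((PySem.Chars.startswith_iff _ _).mp h)
    rw [if_neg hs, if_neg hp]
    simp only [PySem.Str.find_eq,
      show "\nConstraints Error".toList = '\n' :: pvM from by decide]
    by_cases hf : PySem.Chars.find s.toList ('\n' :: pvM) = -1
    · rw [if_neg (not_not_intro hf), if_pos hf]
      rfl
    · rw [if_pos hf, if_neg hf, PySem.Str.toList_slice, PySem.Chars.slice_eq_listSlice]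

-- ===== VERDICT (by name: the statement is the Claim_ definition above) =====
theorem filter_constraints_error_spec : Claim_equal_filter_constraints_error := by
  intro s _
  unfold Spec_filter_constraints_error
  have hbridge := PySem.Str.split?_map s "\n"
  rw [show PySem.Chars.split? s.toList "\n".toList
        = some (PySem.Chars.splitOn s.toList ['\n']) from by
      simp [PySem.Chars.split?]] at hbridge
  cases hsp : PySem.Str.split? s "\n" with
  | none => rw [hsp] at hbridge; simp at hbridge
  | some L =>
    rw [hsp] at hbridge
    simp only [Option.map_some, Option.some.injEq] at hbridge
    have hL : L.map String.toList = pvSplit s.toList := by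
      rw [hbridge, splitOn_eq_pvSplit]
    rw [← String.toList_inj]
    unfold filter_constraints_error
    rw [hsp]
    simp only [Option.getD_some]
    rw [show PySem.List.enumerate L = PySem.List.enumerate L ((0 : Nat) : Int) from rfl]
    rw [fceLoop_eq_pvA L 0 L (by simp)]
    rw [pvA_toList, hL, pvAC_pvSplit s.toList.length s.toList le_rfl, alt_toList]
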